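-- pv_equiv track=rewrite | github.com/idrikreka01/ai-website-audit | worker/report_generator.py | _group_category_scores_by_stage
-- ===== SOURCE A (Python) =====
-- def _group_category_scores_by_stage(category_scores: list[dict], questions: list[dict]) -> dict:
--     """
--     Group category scores by stage (Awareness, Consideration, Conversion).
--
--     Returns dict with structure:
--     {
--         "awareness": [category_scores...],
--         "consideration": [category_scores...],
--         "conversion": [category_scores...]
--     }
--     """
--     stages = ["Awareness", "Consideration", "Conversion"]
--     stage_categories = {stage.lower(): [] for stage in stages}
--
--     category_to_stage = {}
--     for question in questions:
--         category = question.get("bar_chart_category", "")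
--         stage = question.get("category", "")
--         if stage in stages:
--             category_to_stage[category] = stage.lower()
--
--     for cat_score in category_scores:
--         category = cat_score.get("category", "")
--         stage = category_to_stage.get(category)
--         if stage and stage in stage_categories:
--             stage_categories[stage].append(cat_score)
--
--     return stage_categories
-- ===== SOURCE B (Python) =====
-- def _group_category_scores_by_stage(category_scores: list[dict], questions: list[dict]) -> dict:
--     stages = ["Awareness", "Consideration", "Conversion"]
--
--     def stage_of(cat_score):
--         category = cat_score.get("category", "")
--         stage = None
--         for q in questions:
--             if q.get("bar_chart_category", "") == category and q.get("category", "") in stages: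
--                 stage = q.get("category", "").lower()
--         return stage
--
--     return {s.lower(): [cs for cs in category_scores if stage_of(cs) == s.lower()]
--             for s in stages}
-- ===== Notes on version B (the rewrite author's own statement) =====
-- stated objective: alternative
-- what changed: B builds the result as a dict comprehension over the three stages, computing each bucket independently as a filter of category_scores by a helper that resolves a score's stage with a direct last-match scan of questions; no precomputed category-to-stage dict and no mutable bucket appending.
import Mathlib
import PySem

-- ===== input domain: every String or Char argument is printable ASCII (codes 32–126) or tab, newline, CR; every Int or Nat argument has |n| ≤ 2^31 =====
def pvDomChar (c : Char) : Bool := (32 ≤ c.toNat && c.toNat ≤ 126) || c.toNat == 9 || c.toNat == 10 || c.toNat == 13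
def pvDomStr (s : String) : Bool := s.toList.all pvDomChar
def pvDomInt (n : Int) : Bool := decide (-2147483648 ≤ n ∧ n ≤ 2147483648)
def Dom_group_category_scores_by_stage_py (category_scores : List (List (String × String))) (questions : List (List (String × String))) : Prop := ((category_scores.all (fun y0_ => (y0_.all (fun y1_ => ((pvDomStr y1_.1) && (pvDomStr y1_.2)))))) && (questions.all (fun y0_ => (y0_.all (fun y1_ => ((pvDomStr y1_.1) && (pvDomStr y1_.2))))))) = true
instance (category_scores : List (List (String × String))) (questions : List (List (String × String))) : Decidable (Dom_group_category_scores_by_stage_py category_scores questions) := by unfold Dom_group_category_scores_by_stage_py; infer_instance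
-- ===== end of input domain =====

-- B replaces A's precompute-then-append grouping by a per-stage dict comprehension:
-- each bucket is an independent filter of category_scores by a last-match scan of questions
-- (alternative decomposition, same return value).

-- ===== PORT A =====
-- shared helper: d.get(k, "") on an assoc-list dict (first match)
def pvGetS (d : List (String × String)) (k : String) : String :=
  (PySem.Dict.mk d).getD k ""

def group_category_scores_by_stage_py (category_scores : List (List (String × String))) (questions : List (List (String × String))) : List (String × List (List (String × String))) :=
  let stages : List String := ["Awareness", "Consideration", "Conversion"]
  let stage_categories : PySem.Dict String (List (List (String × String))) :=
    stages.foldl (fun d s => d.insert (PySem.Str.lower s) []) PySem.Dict.empty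
  let category_to_stage : PySem.Dict String String :=
    questions.foldl (fun d q =>
      let category := pvGetS q "bar_chart_category"
      let stage := pvGetS q "category"
      if stage ∈ stages then d.insert category (PySem.Str.lower stage) else d)
      PySem.Dict.empty
  let final := category_scores.foldl (fun d cat_score =>
      let category := pvGetS cat_score "category"
      match category_to_stage.get? category with
      | none => d
      | some stage =>
        if stage ≠ "" ∧ d.contains stage = true then d.modify stage [] (· ++ [cat_score]) else d)
    stage_categories
  final.items

-- ===== PORT B =====
-- helper stage_of: forward scan of questions, last matching question wins
def pvStageOf (questions : List (List (String × String))) (cat_score : List (String × String)) : Option String :=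
  let category := pvGetS cat_score "category"
  questions.foldl (fun stage q =>
    if pvGetS q "bar_chart_category" = category ∧
       pvGetS q "category" ∈ ["Awareness", "Consideration", "Conversion"]
    then some (PySem.Str.lower (pvGetS q "category")) else stage) none

-- the dict comprehension's three keys (the lowercased stages) are distinct literals,
-- so the resulting dict IS the list of pairs in comprehension order
def group_category_scores_by_stage_py_alt (category_scores : List (List (String × String))) (questions : List (List (String × String))) : List (String × List (List (String × String))) :=
  ["Awareness", "Consideration", "Conversion"].map (fun s =>
    (PySem.Str.lower s,
     category_scores.filter (fun cs => pvStageOf questions cs == some (PySem.Str.lower s))))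

-- ===== PRECONDITION & SPEC =====
def Spec_group_category_scores_by_stage_py (category_scores : List (List (String × String))) (questions : List (List (String × String))) (out : List (String × List (List (String × String)))) : Prop := out = group_category_scores_by_stage_py_alt category_scores questions
instance (category_scores : List (List (String × String))) (questions : List (List (String × String))) (out : List (String × List (List (String × String)))) : Decidable (Spec_group_category_scores_by_stage_py category_scores questions out) := by unfold Spec_group_category_scores_by_stage_py; infer_instance

-- ===== CLAIM (what is proved, stated in full; the proofs are below) =====
def Claim_equal_group_category_scores_by_stage_py : Prop := ∀ (category_scores : List (List (String × String))) (questions : List (List (String × String))), Dom_group_category_scores_by_stage_py category_scores questions → Spec_group_category_scores_by_stage_py category_scores questions (group_category_scores_by_stage_py category_scores questions)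

-- ===== LEMMAS AND PROOFS =====

-- abbreviation for the proofs (not used by the ports)
def pvLow : List String := ["awareness", "consideration", "conversion"]

-- A's dict lookup equals B's last-match scan of the questions list.
theorem pv_scan_eq (questions : List (List (String × String))) (x : List (String × String))
    (d : PySem.Dict String String) :
    (questions.foldl (fun d q =>
      if pvGetS q "category" ∈ ["Awareness", "Consideration", "Conversion"]
      then d.insert (pvGetS q "bar_chart_category") (PySem.Str.lower (pvGetS q "category")) else d)
      d).get? (pvGetS x "category")
    = questions.foldl (fun stage q =>
        if pvGetS q "bar_chart_category" = pvGetS x "category" ∧ pvGetS q "category" ∈ ["Awareness", "Consideration", "Conversion"]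
        then some (PySem.Str.lower (pvGetS q "category")) else stage) (d.get? (pvGetS x "category")) := by
  induction questions generalizing d with
  | nil => rfl
  | cons q qs ih =>
    simp only [List.foldl_cons]
    by_cases hs : pvGetS q "category" ∈ ["Awareness", "Consideration", "Conversion"]
    · simp only [hs, if_true, and_true]
      by_cases hx : pvGetS q "bar_chart_category" = pvGetS x "category"
      · rw [ih, hx, PySem.Dict.get?_insert_self]
        simp
      · rw [ih]
        have : (d.insert (pvGetS q "bar_chart_category") (PySem.Str.lower (pvGetS q "category"))).get? (pvGetS x "category") = d.get? (pvGetS x "category") :=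
          PySem.Dict.get?_insert_of_ne _ _ (fun h => hx h.symm)
        rw [this]
        simp [hx]
    · simp only [hs, if_false, and_false]
      exact ih d

-- any stage produced by the scan is one of the three lowercased stage names
theorem pv_scan_mem (questions : List (List (String × String))) (x : List (String × String))
    (acc : Option String)
    (hacc : ∀ s, acc = some s → s ∈ pvLow) :
    ∀ s, (questions.foldl (fun stage q =>
        if pvGetS q "bar_chart_category" = pvGetS x "category" ∧ pvGetS q "category" ∈ ["Awareness", "Consideration", "Conversion"]
        then some (PySem.Str.lower (pvGetS q "category")) else stage) acc) = some s →
      s ∈ pvLow := by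
  induction questions generalizing acc with
  | nil => exact hacc
  | cons q qs ih =>
    simp only [List.foldl_cons]
    apply ih
    intro s hs
    by_cases h : pvGetS q "bar_chart_category" = pvGetS x "category" ∧ pvGetS q "category" ∈ ["Awareness", "Consideration", "Conversion"]
    · simp only [h] at hs
      rcases h with ⟨-, hmem⟩
      simp only [List.mem_cons, List.not_mem_nil, or_false] at hmem
      rcases hmem with h1 | h1 | h1 <;> rw [h1] at hs <;>
        (injection hs with hs; rw [← hs]; decide)
    · simp only [h, if_false] at hs
      exact hacc s hs

-- A's main loop, with the lookup rewritten as pvStageOf: keys are preserved and each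
-- bucket collects exactly the filter, as long as all three lowercase stages are keys.
theorem pv_fold_getD (questions : List (List (String × String)))
    (cs : List (List (String × String)))
    (d : PySem.Dict String (List (List (String × String))))
    (hd : ∀ s ∈ pvLow, d.contains s = true) (s : String) :
    (cs.foldl (fun d c =>
        match pvStageOf questions c with
        | none => d
        | some stage =>
          if stage ≠ "" ∧ d.contains stage = true then d.modify stage [] (· ++ [c]) else d) d).getD s []
      = d.getD s [] ++ cs.filter (fun c => pvStageOf questions c == some s) := by
  induction cs generalizing d with
  | nil => simp
  | cons c cs ih =>
    simp only [List.foldl_cons, List.filter_cons]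
    cases hsc : pvStageOf questions c with
    | none =>
      simpa using ih d hd
    | some stage =>
      have hmem : stage ∈ pvLow := pv_scan_mem questions c none (by intro t h; cases h) stage hsc
      have hne : stage ≠ "" := by
        simp only [pvLow, List.mem_cons, List.not_mem_nil, or_false] at hmem
        rcases hmem with h | h | h <;> subst h <;> decide
      have hcon : d.contains stage = true := hd stage hmem
      simp only [hne, hcon, ne_eq, not_false_iff, and_self, if_true]
      have hd' : ∀ t ∈ pvLow, (d.modify stage [] (· ++ [c])).contains t = true := by
        intro t ht
        rw [PySem.Dict.contains_modify]
        by_cases htt : t == stage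
        · simp [htt]
        · simp only [htt, Bool.false_or]; exact hd t ht
      rw [ih _ hd']
      by_cases hss : s = stage
      · subst hss
        rw [PySem.Dict.getD_modify_self]
        simp [List.append_assoc]
      · rw [PySem.Dict.getD_modify_of_ne d [] (fun x => x ++ [c]) hss]
        simp [Ne.symm hss]

theorem pv_fold_keys (questions : List (List (String × String)))
    (cs : List (List (String × String)))
    (d : PySem.Dict String (List (List (String × String))))
    (hd : ∀ s ∈ pvLow, d.contains s = true) :
    (cs.foldl (fun d c =>
        match pvStageOf questions c with
        | none => d
        | some stage =>
          if stage ≠ "" ∧ d.contains stage = true then d.modify stage [] (· ++ [c]) else d) d).keys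
      = d.keys := by
  induction cs generalizing d with
  | nil => rfl
  | cons c cs ih =>
    simp only [List.foldl_cons]
    cases hsc : pvStageOf questions c with
    | none => exact ih d hd
    | some stage =>
      have hmem : stage ∈ pvLow := pv_scan_mem questions c none (by intro t h; cases h) stage hsc
      have hne : stage ≠ "" := by
        simp only [pvLow, List.mem_cons, List.not_mem_nil, or_false] at hmem
        rcases hmem with h | h | h <;> subst h <;> decide
      have hcon : d.contains stage = true := hd stage hmem
      simp only [hne, hcon, ne_eq, not_false_iff, and_self, if_true]
      have hd' : ∀ t ∈ pvLow, (d.modify stage [] (· ++ [c])).contains t = true := by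
        intro t ht
        rw [PySem.Dict.contains_modify]
        by_cases htt : t == stage
        · simp [htt]
        · simp only [htt, Bool.false_or]; exact hd t ht
      rw [ih _ hd', PySem.Dict.keys_modify, PySem.Dict.keys_insert_of_contains _ _ hcon]

theorem pv_main (category_scores questions : List (List (String × String))) :
    group_category_scores_by_stage_py category_scores questions
      = group_category_scores_by_stage_py_alt category_scores questions := by
  unfold group_category_scores_by_stage_py
  simp only []
  -- rewrite A's lookup of the precomputed dict into B's scan
  have hstep :
      (fun (d : PySem.Dict String (List (List (String × String)))) cat_score =>
        match (questions.foldl (fun d q =>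
            if pvGetS q "category" ∈ ["Awareness", "Consideration", "Conversion"]
            then d.insert (pvGetS q "bar_chart_category") (PySem.Str.lower (pvGetS q "category"))
            else d) PySem.Dict.empty).get? (pvGetS cat_score "category") with
        | none => d
        | some stage =>
          if stage ≠ "" ∧ d.contains stage = true then d.modify stage [] (· ++ [cat_score]) else d)
      = (fun (d : PySem.Dict String (List (List (String × String)))) c =>
        match pvStageOf questions c with
        | none => d
        | some stage =>
          if stage ≠ "" ∧ d.contains stage = true then d.modify stage [] (· ++ [c]) else d) := by
    funext d c
    have h := pv_scan_eq questions c PySem.Dict.empty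
    rw [PySem.Dict.get?_empty] at h
    simp only [pvStageOf]
    rw [h]
  rw [hstep]
  set init : PySem.Dict String (List (List (String × String))) :=
    (["Awareness", "Consideration", "Conversion"].foldl
      (fun d s => d.insert (PySem.Str.lower s) []) PySem.Dict.empty) with hinit
  have hinitc : ∀ s ∈ pvLow, init.contains s = true := by decide
  have hkeys := pv_fold_keys questions category_scores init hinitc
  have hinitkeys : init.keys = pvLow := by decide
  have hnodup : (category_scores.foldl (fun d c =>
      match pvStageOf questions c with
      | none => d
      | some stage =>
        if stage ≠ "" ∧ d.contains stage = true then d.modify stage [] (· ++ [c]) else d) init).keys.Nodup := by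
    rw [hkeys, hinitkeys]; decide
  rw [PySem.Dict.items_eq_map_keys _ hnodup []]
  rw [hkeys, hinitkeys]
  have hg : ∀ s ∈ pvLow, init.getD s [] = [] := by decide
  unfold group_category_scores_by_stage_py_alt
  simp only [pvLow, List.map_cons, List.map_nil]
  congr 1
  · rw [pv_fold_getD questions category_scores init hinitc "awareness",
        hg "awareness" (by decide)]
    rfl
  congr 1
  · rw [pv_fold_getD questions category_scores init hinitc "consideration",
        hg "consideration" (by decide)]
    rfl
  congr 1
  · rw [pv_fold_getD questions category_scores init hinitc "conversion",
        hg "conversion" (by decide)]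
    rfl

-- ===== VERDICT (by name: the statement is the Claim_ definition above) =====
theorem group_category_scores_by_stage_py_spec : Claim_equal_group_category_scores_by_stage_py := by
  intro category_scores questions _
  exact pv_main category_scores questions
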